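-- pv_equiv track=rewrite | github.com/wannli/un-docs-downloader | src/un_docs_downloader/static_generator.py | group_documents_by_pattern
-- ===== SOURCE A (Python) =====
-- def group_documents_by_pattern(documents: list) -> dict:
--     """
--     Group documents by their source pattern directory.
--
--     Args:
--         documents: List of document dicts
--
--     Returns:
--         Dict mapping pattern names to lists of documents
--     """
--     documents_by_pattern = {}
--     for doc in documents:
--         # Convert pattern_dir (e.g., "L_documents") to readable name (e.g., "L documents")
--         pattern = doc.get("pattern_dir", "Unknown").replace("_", " ")
--         if pattern not in documents_by_pattern:
--             documents_by_pattern[pattern] = []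
--         documents_by_pattern[pattern].append(doc)
--     return documents_by_pattern
-- ===== SOURCE B (Python) =====
-- def group_documents_by_pattern(documents: list) -> dict:
--     """
--     Group documents by their source pattern directory.
--
--     Two-pass reformulation: collect the distinct pattern names in first-occurrence
--     order, then build each group by filtering the document list once per pattern.
--     """
--     def key(doc):
--         return doc.get("pattern_dir", "Unknown").replace("_", " ")
--
--     patterns = list(dict.fromkeys(key(doc) for doc in documents))
--     return {p: [doc for doc in documents if key(doc) == p] for p in patterns}
-- ===== Notes on version B (the rewrite author's own statement) =====
-- stated objective: alternative
-- what changed: A builds the groups in one pass by inserting into a dict keyed on the cleaned pattern name; B first dedups the pattern names in first-occurrence order and then builds each group by a per-pattern filter over the document list.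
import Mathlib
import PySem

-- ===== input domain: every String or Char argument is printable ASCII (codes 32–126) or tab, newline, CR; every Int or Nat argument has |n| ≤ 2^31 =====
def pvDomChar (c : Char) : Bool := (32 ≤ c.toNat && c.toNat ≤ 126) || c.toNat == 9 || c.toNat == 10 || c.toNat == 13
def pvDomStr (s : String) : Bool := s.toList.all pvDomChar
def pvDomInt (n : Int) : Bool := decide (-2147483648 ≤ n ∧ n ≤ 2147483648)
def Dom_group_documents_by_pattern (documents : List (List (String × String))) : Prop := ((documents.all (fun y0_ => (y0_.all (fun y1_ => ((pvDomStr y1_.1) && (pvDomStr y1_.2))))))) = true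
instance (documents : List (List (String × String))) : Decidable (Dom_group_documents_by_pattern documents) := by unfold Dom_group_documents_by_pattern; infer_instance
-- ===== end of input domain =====

-- B replaces A's one-pass dict-insertion grouping by a two-pass dedup-then-filter; same result, different decomposition.

-- shared key expression: doc.get("pattern_dir", "Unknown").replace("_", " ")
def pvKey (doc : List (String × String)) : String :=
  PySem.Str.replace ((PySem.Dict.mk doc).getD "pattern_dir" "Unknown") "_" " "

-- ===== PORT A =====
def group_documents_by_pattern (documents : List (List (String × String))) : List (String × List (List (String × String))) :=
  (documents.foldl
    (fun dbp doc =>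
      let pattern := pvKey doc
      let dbp := if dbp.contains pattern then dbp
                 else dbp.insert pattern ([] : List (List (String × String)))
      dbp.modify pattern [] (fun l => l ++ [doc]))
    PySem.Dict.empty).items

-- ===== PORT B =====
def group_documents_by_pattern_alt (documents : List (List (String × String))) : List (String × List (List (String × String))) :=
  (PySem.List.dedup (documents.map pvKey)).map
    (fun p => (p, documents.filter (fun doc => pvKey doc == p)))

-- ===== PRECONDITION & SPEC =====
def Spec_group_documents_by_pattern (documents : List (List (String × String))) (out : List (String × List (List (String × String)))) : Prop := out = group_documents_by_pattern_alt documents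
instance (documents : List (List (String × String))) (out : List (String × List (List (String × String)))) : Decidable (Spec_group_documents_by_pattern documents out) := by unfold Spec_group_documents_by_pattern; infer_instance

-- ===== CLAIM (what is proved, stated in full; the proofs are below) =====
def Claim_equal_group_documents_by_pattern : Prop := ∀ (documents : List (List (String × String))), Dom_group_documents_by_pattern documents → Spec_group_documents_by_pattern documents (group_documents_by_pattern documents)

-- ===== LEMMAS AND PROOFS =====

-- if `k` is not a key of `d`, then `d.items` carries no pair keyed `k`
theorem items_key_ne_of_not_contains {ν : Type} (d : PySem.Dict String ν) (k : String)
    (h : d.contains k = false) : ∀ p ∈ d.items, (p.1 == k) = false := by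
  intro p hp
  by_contra hne
  have hk : p.1 = k := by
    cases hbe : (p.1 == k) with
    | false => exact absurd hbe hne
    | true => exact eq_of_beq hbe
  have : d.contains k = true := by
    rw [PySem.Dict.contains_iff_mem_keys]
    exact hk ▸ PySem.Dict.mem_keys_of_mem_items d hp
  simp [this] at h

-- A's conditional step equals a plain `modify`
theorem step_eq_modify (d : PySem.Dict String (List (List (String × String)))) (doc : List (String × String)) :
    (let pattern := pvKey doc
     let d' := if d.contains pattern then d else d.insert pattern []
     d'.modify pattern [] (fun l => l ++ [doc]))
    = d.modify (pvKey doc) [] (fun l => l ++ [doc]) := by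
  by_cases h : d.contains (pvKey doc) = true
  · simp [h]
  · have h' : d.contains (pvKey doc) = false := by simpa using h
    simp only [h']
    show (d.insert (pvKey doc) []).insert (pvKey doc)
          ((d.insert (pvKey doc) []).getD (pvKey doc) [] ++ [doc])
        = d.insert (pvKey doc) (d.getD (pvKey doc) [] ++ [doc])
    rw [PySem.Dict.getD_insert_self, PySem.Dict.getD_of_not_contains d _ h']
    apply PySem.Dict.ext
    rw [PySem.Dict.items_insert_of_contains _ _ (PySem.Dict.contains_insert_self d _ _),
        PySem.Dict.items_insert_of_not_contains d _ h',
        PySem.Dict.items_insert_of_not_contains d _ h', List.map_append]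
    have hne := items_key_ne_of_not_contains d (pvKey doc) h'
    simp only [List.map_cons, List.map_nil, BEq.rfl, if_pos]
    congr 1
    rw [List.map_congr_left (g := id) (fun p hp => by simp [hne p hp]), List.map_id]

-- a dict with distinct keys is its keys paired with their values
theorem items_eq_keys_map_getD {ν : Type} (d : PySem.Dict String ν) (d0 : ν)
    (h : d.keys.Nodup) : d.items = d.keys.map (fun k => (k, d.getD k d0)) := by
  simp only [PySem.Dict.keys, List.map_map]
  symm
  have hcong : ∀ p ∈ d.items, ((fun k => (k, d.getD k d0)) ∘ (fun p : String × ν => p.1)) p = id p := by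
    intro p hp
    obtain ⟨k, v⟩ := p
    have := PySem.Dict.getD_of_mem_items d hp h d0
    simp [this]
  rw [List.map_congr_left hcong, List.map_id]

-- ===== VERDICT (by name: the statement is the Claim_ definition above) =====
theorem group_documents_by_pattern_spec : Claim_equal_group_documents_by_pattern := by
  intro documents _
  unfold Spec_group_documents_by_pattern
  -- replace A's conditional step with a plain modify over (key, doc) pairs
  have h1 : (documents.foldl
      (fun (dbp : PySem.Dict String (List (List (String × String)))) doc =>
        let pattern := pvKey doc
        let dbp := if dbp.contains pattern then dbp
                   else dbp.insert pattern ([] : List (List (String × String)))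
        dbp.modify pattern [] (fun l => l ++ [doc]))
      PySem.Dict.empty)
      = (documents.map (fun doc => (pvKey doc, doc))).foldl
        (fun (d : PySem.Dict String (List (List (String × String)))) (p : String × List (String × String)) =>
          d.modify p.1 [] (fun l => l ++ [p.2]))
        PySem.Dict.empty := by
    rw [List.foldl_map]
    exact PySem.List.foldl_congr_mem documents _ _ _ (fun acc x _ => step_eq_modify acc x)
  refine Eq.trans (congrArg PySem.Dict.items h1) ?_
  set l := documents.map (fun doc => (pvKey doc, doc)) with hl
  set D := l.foldl (fun (d : PySem.Dict String (List (List (String × String)))) p =>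
      d.modify p.1 [] (fun l => l ++ [p.2])) PySem.Dict.empty with hD
  have hnodup : D.keys.Nodup := by
    rw [hD]
    exact PySem.Dict.nodup_keys_foldl_modify_key l Prod.fst [] (fun _ p => (· ++ [p.2])) _
      PySem.Dict.nodup_keys_empty
  have hkeys : D.keys = PySem.Set.ofList (documents.map pvKey) := by
    rw [hD, PySem.Dict.keys_foldl_modify_key l Prod.fst [] (fun _ p => (· ++ [p.2]))]
    simp only [PySem.Dict.keys_empty, hl, List.map_map]
    rfl
  have hget : ∀ k, D.getD k [] = documents.filter (fun doc => pvKey doc == k) := by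
    intro k
    rw [hD, PySem.Dict.getD_foldl_modify_append, PySem.Dict.getD_empty]
    simp [hl, List.filter_map, Function.comp_def]
  rw [items_eq_keys_map_getD D [] hnodup, hkeys]
  unfold group_documents_by_pattern_alt
  rw [PySem.List.dedup_eq_ofList]
  exact List.map_congr_left (fun k _ => by rw [hget k])
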